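-- pv_equiv track=rewrite | github.com/humemai/co-learning | custom_agents.py | large_empty_check
-- ===== SOURCE A (Python) =====
-- def large_empty_check(large_obj, state, object_locs):
--     y_locs = []
--     for part in large_obj:
--         object_loc = state[part]['location']
--         object_loc_y = object_loc[1]
--         y_locs.append(object_loc_y)
--
--     lowest_y = max(y_locs, default=0)
--     lowest_obj = [i for i in range(len(y_locs)) if y_locs[i] == lowest_y]     # List of objects with lowest y
--
--     for obj_ind in lowest_obj:
--         object_loc = state[large_obj[obj_ind]]['location']
--         object_loc_x = object_loc[0]
--         object_loc_y = object_loc[1]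
--         if object_loc_y < 10:
--             underneath_loc = (object_loc_x, object_loc_y+1)
--             if underneath_loc in object_locs:                   # If any location underneath is not empty, don't fall
--                 return False
--         else:
--             return False                        # If any object is already on the ground, don't fall
--
--     return True
-- ===== SOURCE B (Python) =====
-- def large_empty_check(large_obj, state, object_locs):
--     # Sort the part locations by row descending, then scan only the leading
--     # prefix of bottom-row ties, breaking at the first strictly higher part.
--     occupied = set(object_locs)
--     parts = sorted((state[p]['location'] for p in large_obj),
--                    key=lambda loc: loc[1], reverse=True)
--     if not parts:
--         return True
--     bottom = parts[0][1]
--     for x, y in parts: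
--         if y < bottom:
--             break
--         if y >= 10 or (x, y + 1) in occupied:
--             return False
--     return True
-- ===== Notes on version B (the rewrite author's own statement) =====
-- stated objective: alternative
-- what changed: B never computes the maximum or filters by it: it sorts the looked-up locations by row descending, its bottom row is the head, and it scans only the leading run of ties (breaking at the first strictly higher part), with occupancy tested against a set built once.
import Mathlib
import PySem

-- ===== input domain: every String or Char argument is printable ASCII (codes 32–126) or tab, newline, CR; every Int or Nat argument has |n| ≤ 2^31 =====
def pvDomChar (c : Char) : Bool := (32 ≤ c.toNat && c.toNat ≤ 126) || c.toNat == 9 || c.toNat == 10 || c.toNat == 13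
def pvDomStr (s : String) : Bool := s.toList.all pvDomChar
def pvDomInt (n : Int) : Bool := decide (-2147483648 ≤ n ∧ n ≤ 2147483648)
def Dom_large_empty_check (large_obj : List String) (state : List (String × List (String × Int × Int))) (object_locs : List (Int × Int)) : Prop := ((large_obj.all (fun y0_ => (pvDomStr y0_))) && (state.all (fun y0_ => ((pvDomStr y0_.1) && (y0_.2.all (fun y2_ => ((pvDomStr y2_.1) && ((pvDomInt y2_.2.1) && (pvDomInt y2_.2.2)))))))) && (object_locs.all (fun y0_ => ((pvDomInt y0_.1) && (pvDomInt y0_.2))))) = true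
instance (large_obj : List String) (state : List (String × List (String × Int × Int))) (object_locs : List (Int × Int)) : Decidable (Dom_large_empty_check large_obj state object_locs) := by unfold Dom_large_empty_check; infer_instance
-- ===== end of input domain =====

-- B sorts the part locations by row descending and scans only the leading run of
-- bottom-row ties (set membership for occupancy), instead of A's max + index filter
-- + re-lookup; objective: alternative.

-- state[part]['location']  (none = KeyError, excluded by Pre_)
def pvLoc (state : List (String × List (String × Int × Int))) (part : String) : Option (Int × Int) :=
  match (PySem.Dict.mk state).get? part with
  | none => none
  | some d => (PySem.Dict.mk d).get? "location"

-- ===== PORT A =====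
-- A's second loop over lowest_obj (indices into large_obj), with its early returns
def pvLoopA (large_obj : List String) (state : List (String × List (String × Int × Int))) (object_locs : List (Int × Int)) : List Nat → Bool
  | [] => true
  | i :: rest =>
    if ((pvLoc state (large_obj.getD i "")).getD (0, 0)).2 < 10 then
      if (((pvLoc state (large_obj.getD i "")).getD (0, 0)).1,
          ((pvLoc state (large_obj.getD i "")).getD (0, 0)).2 + 1) ∈ object_locs then false
      else pvLoopA large_obj state object_locs rest
    else false

def large_empty_check (large_obj : List String) (state : List (String × List (String × Int × Int))) (object_locs : List (Int × Int)) : Bool :=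
  let y_locs := large_obj.map (fun part => ((pvLoc state part).getD (0, 0)).2)
  let lowest_y := (PySem.List.max? y_locs (fun y => y)).getD 0
  let lowest_obj := (List.range y_locs.length).filter (fun i => y_locs.getD i 0 == lowest_y)
  pvLoopA large_obj state object_locs lowest_obj

-- ===== PORT B =====
-- B's scan over the sorted locations: break at the first strictly higher row
def pvScanB (occupied : PySem.Set (Int × Int)) (bottom : Int) : List (Int × Int) → Bool
  | [] => true
  | (x, y) :: rest =>
    if y < bottom then true
    else if 10 ≤ y then false
    else if PySem.Set.contains occupied (x, y + 1) then false
    else pvScanB occupied bottom rest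

def large_empty_check_alt (large_obj : List String) (state : List (String × List (String × Int × Int))) (object_locs : List (Int × Int)) : Bool :=
  let occupied : PySem.Set (Int × Int) := PySem.Set.ofList object_locs
  let parts := PySem.List.sorted (large_obj.map (fun p => (pvLoc state p).getD (0, 0)))
    (fun loc => loc.2) true
  match parts with
  | [] => true
  | p0 :: _ => pvScanB occupied p0.2 parts

-- ===== PRECONDITION & SPEC =====
-- Pre_ excludes exactly the inputs where Python A raises KeyError: some part of
-- large_obj missing from state, or its entry lacking a 'location' key.
def Pre_large_empty_check (large_obj : List String) (state : List (String × List (String × Int × Int))) (_object_locs : List (Int × Int)) : Prop :=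
  large_obj.all (fun part => (pvLoc state part).isSome) = true
instance (large_obj : List String) (state : List (String × List (String × Int × Int))) (object_locs : List (Int × Int)) : Decidable (Pre_large_empty_check large_obj state object_locs) := by unfold Pre_large_empty_check; infer_instance

def pvWitness_large_empty_check : List String × (List (String × List (String × Int × Int))) × (List (Int × Int)) :=
  (["a", "b"], [("a", [("location", 1, 2)]), ("b", [("location", 2, 2)])], [(1, 3)])

def Spec_large_empty_check (large_obj : List String) (state : List (String × List (String × Int × Int))) (object_locs : List (Int × Int)) (out : Bool) : Prop := out = large_empty_check_alt large_obj state object_locs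
instance (large_obj : List String) (state : List (String × List (String × Int × Int))) (object_locs : List (Int × Int)) (out : Bool) : Decidable (Spec_large_empty_check large_obj state object_locs out) := by unfold Spec_large_empty_check; infer_instance

-- ===== CLAIM (what is proved, stated in full; the proofs are below) =====
def Claim_equal_large_empty_check : Prop := ∀ (large_obj : List String) (state : List (String × List (String × Int × Int))) (object_locs : List (Int × Int)), Dom_large_empty_check large_obj state object_locs → Pre_large_empty_check large_obj state object_locs → Spec_large_empty_check large_obj state object_locs (large_empty_check large_obj state object_locs)

-- ===== LEMMAS AND PROOFS =====

-- the per-part pass predicate shared by both loops (A's membership form)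
def pvPass (object_locs : List (Int × Int)) (p : Int × Int) : Bool :=
  decide (p.2 < 10) && !decide ((p.1, p.2 + 1) ∈ object_locs)

theorem loopA_eq_loopB (large_obj : List String) (state : List (String × List (String × Int × Int))) (object_locs : List (Int × Int)) (idxs : List Nat) :
    pvLoopA large_obj state object_locs idxs
      = ((idxs.map (fun i => (pvLoc state (large_obj.getD i "")).getD (0, 0))).all
          (pvPass object_locs)) := by
  induction idxs with
  | nil => rfl
  | cons i rest ih =>
    rcases h : (pvLoc state (large_obj.getD i "")).getD (0, 0) with ⟨x, y⟩
    simp only [pvLoopA, List.map_cons, List.all_cons, h, pvPass]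
    by_cases hy : y < 10
    · by_cases hm : (x, y + 1) ∈ object_locs
      · simp [hy, hm]
      · simp [hy, hm, ih]
    · simp [hy]

theorem idx_filter_map (locs : List (Int × Int)) (M : Int) :
    ((List.range locs.length).filter (fun i => (locs.map Prod.snd).getD i 0 == M)).map
        (fun i => locs.getD i (0, 0))
      = locs.filter (fun p => p.2 == M) := by
  induction locs using List.reverseRecOn with
  | nil => rfl
  | append_singleton l a ih =>
    have hlen : (l ++ [a]).length = l.length + 1 := by simp
    rw [hlen, List.range_succ, List.filter_append, List.map_append]
    have h1 : (List.range l.length).filter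
          (fun i => ((l ++ [a]).map Prod.snd).getD i 0 == M)
        = (List.range l.length).filter (fun i => (l.map Prod.snd).getD i 0 == M) := by
      apply List.filter_congr
      intro i hi
      have hil : i < l.length := List.mem_range.mp hi
      have : ((l ++ [a]).map Prod.snd).getD i 0 = (l.map Prod.snd).getD i 0 := by
        rw [List.map_append]
        exact List.getD_append _ _ _ _ (by simpa using hil)
      rw [this]
    rw [h1]
    have h2 : ((List.range l.length).filter (fun i => (l.map Prod.snd).getD i 0 == M)).map
          (fun i => (l ++ [a]).getD i (0, 0))
        = ((List.range l.length).filter (fun i => (l.map Prod.snd).getD i 0 == M)).map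
          (fun i => l.getD i (0, 0)) := by
      apply List.map_congr_left
      intro i hi
      have hil : i < l.length := List.mem_range.mp (List.mem_of_mem_filter hi)
      exact List.getD_append _ _ _ _ hil
    rw [h2, ih]
    have hgetA : ((l ++ [a]).map Prod.snd).getD l.length 0 = a.2 := by
      rw [List.map_append]
      simp [List.getD_eq_getElem?_getD]
    have hgetA2 : (l ++ [a]).getD l.length (0, 0) = a := by
      simp [List.getD_eq_getElem?_getD]
    by_cases hM : a.2 = M
    · simp [hM, List.filter_append]
    · simp [hM, List.filter_append]

-- B's scan on a row-descending list checks exactly the elements tied at `bottom`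
theorem scanB_eq_all (object_locs : List (Int × Int)) (bottom : Int) (l : List (Int × Int))
    (hpw : l.Pairwise (fun a b => b.2 ≤ a.2)) (hle : ∀ p ∈ l, p.2 ≤ bottom) :
    pvScanB (PySem.Set.ofList object_locs) bottom l
      = (l.filter (fun p => p.2 == bottom)).all (pvPass object_locs) := by
  induction l with
  | nil => rfl
  | cons p rest ih =>
    rcases p with ⟨x, y⟩
    have hpw' := (List.pairwise_cons.mp hpw)
    have hrest := ih hpw'.2 (fun q hq => hle q (List.mem_cons_of_mem _ hq))
    by_cases hlt : y < bottom
    · have hfilter : ((⟨x, y⟩ :: rest).filter (fun p => p.2 == bottom)) = [] := by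
        rw [List.filter_eq_nil_iff]
        intro q hq
        rcases List.mem_cons.mp hq with h | h
        · subst h; simp; omega
        · have := hpw'.1 q h; simp; omega
      rw [hfilter]
      simp [pvScanB, hlt]
    · have hy : y = bottom := le_antisymm (hle _ List.mem_cons_self) (by omega)
      subst hy
      have hmem_iff : PySem.Set.contains (PySem.Set.ofList object_locs) (x, y + 1) = true
          ↔ (x, y + 1) ∈ object_locs := by
        rw [PySem.Set.contains_iff, PySem.Set.mem_ofList]
      simp only [pvScanB, hlt, if_false, List.filter_cons]
      by_cases h10 : (10 : Int) ≤ y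
      · simp [pvPass, h10, show ¬ y < 10 by omega]
      · by_cases hm : (x, y + 1) ∈ object_locs
        · simp [pvPass, hm]
        · simp [pvPass, h10, hm, hrest]
          intro _
          omega

-- ===== VERDICT (by name: the statement is the Claim_ definition above) =====
theorem large_empty_check_spec : Claim_equal_large_empty_check := by
  intro large_obj state object_locs _ _
  unfold Spec_large_empty_check large_empty_check large_empty_check_alt
  set f : String → Int × Int := fun part => (pvLoc state part).getD (0, 0) with hf
  set locs : List (Int × Int) := large_obj.map f with hlocs
  cases large_obj with
  | nil => rfl
  | cons phd ptl =>
    -- B side: sorted list is nonempty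
    have hlocs_ne : locs ≠ [] := by simp [hlocs]
    rcases hs : PySem.List.sorted locs (fun loc => loc.2) true with _ | ⟨p0, t'⟩
    · exact absurd ((PySem.List.sorted_eq_nil_iff locs (fun loc => loc.2) true).mp hs) hlocs_ne
    have hperm : (p0 :: t').Perm locs := hs ▸ PySem.List.sorted_perm locs (fun loc => loc.2) true
    have hpw : (p0 :: t').Pairwise (fun a b => b.2 ≤ a.2) := by
      have := PySem.List.sorted_pairwise_rev locs (fun loc => loc.2)
      rwa [hs] at this
    have hhead : ∀ q ∈ locs, q.2 ≤ p0.2 :=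
      PySem.List.key_head_sorted_rev_ge locs (fun loc => loc.2) hs
    have hhead' : ∀ q ∈ (p0 :: t'), q.2 ≤ p0.2 := fun q hq => hhead q (hperm.mem_iff.mp hq)
    -- A side: the max equals p0.2
    have hys : (phd :: ptl).map (fun part => ((pvLoc state part).getD (0, 0)).2)
        = locs.map Prod.snd := by simp [hlocs, hf]
    have hys_ne : locs.map Prod.snd ≠ [] := by simp [hlocs]
    rcases hmax : PySem.List.max? (locs.map Prod.snd) (fun y => y) with _ | M
    · exact absurd ((PySem.List.max?_eq_none_iff (locs.map Prod.snd) (fun y => y)).mp hmax) hys_ne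
    have hMmem : M ∈ locs.map Prod.snd := PySem.List.max?_mem hmax
    have hMmax : ∀ y ∈ locs.map Prod.snd, y ≤ M := by
      intro y hy; exact PySem.List.max?_isMax hmax y hy
    have hM_eq : M = p0.2 := by
      have h1 : M ≤ p0.2 := by
        rcases List.mem_map.mp hMmem with ⟨q, hq, hq2⟩
        exact hq2 ▸ hhead q hq
      have hp0mem : p0 ∈ locs := hperm.mem_iff.mp (List.mem_cons_self)
      have h2 : p0.2 ≤ M := hMmax p0.2 (List.mem_map.mpr ⟨p0, hp0mem, rfl⟩)
      omega
    -- rewrite A to the filter form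
    rw [loopA_eq_loopB]
    have hmapcongr : ∀ idxs : List Nat, (∀ i ∈ idxs, i < (phd :: ptl).length) →
        idxs.map (fun i => (pvLoc state ((phd :: ptl).getD i "")).getD (0, 0))
        = idxs.map (fun i => locs.getD i (0, 0)) := by
      intro idxs hmem
      apply List.map_congr_left
      intro i hi
      have hil : i < (phd :: ptl).length := hmem i hi
      simp only [List.getD_eq_getElem?_getD, hlocs, List.getElem?_map,
        List.getElem?_eq_getElem hil, Option.map_some, Option.getD_some, hf]
    rw [hys, hmax, Option.getD_some]
    rw [hmapcongr _ (by
      intro i hi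
      have := List.mem_range.mp (List.mem_of_mem_filter hi)
      simp only [hlocs, List.length_map] at this ⊢
      simpa using this)]
    rw [show (List.map Prod.snd locs).length = locs.length by simp]
    rw [idx_filter_map locs M]
    -- rewrite B to the filter form
    show _ = pvScanB (PySem.Set.ofList object_locs) p0.2 (p0 :: t')
    rw [scanB_eq_all object_locs p0.2 (p0 :: t') hpw hhead']
    -- connect the two via the permutation
    rw [hM_eq]
    exact (List.Perm.all_eq (List.Perm.filter _ hperm)).symm
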